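-- pv_equiv track=rewrite | github.com/hayannoon/codetree-TILs | 240523/행복한 수열의 개수/number-of-happy-sequence.py | is_happy_numbers
-- ===== SOURCE A (Python) =====
-- def is_happy_numbers(li, m):
--     max_value = 0
--     cur = 1
--     prev = li[0]
--     for i in range(1, len(li)):
--         if li[i] == prev:
--             cur += 1
--             max_value = max(max_value, cur)
--         else:
--             cur = 1
--         prev = li[i]
--     return max_value >= m
-- ===== SOURCE B (Python) =====
-- def _lead_count(h, t):
--     k = 0
--     while k < len(t) and t[k] == h:
--         k += 1
--     return k
--
--
-- def is_happy_numbers(li, m):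
--     best = 0
--     rest = li
--     while rest:
--         k = _lead_count(rest[0], rest[1:])
--         run = 1 + k
--         if run >= 2:
--             best = max(best, run)
--         rest = rest[run:]
--     return best >= m
-- ===== Notes on version B (the rewrite author's own statement) =====
-- stated objective: alternative
-- what changed: Replaces A's single-pass running-counter/prev scan with a run-skipping decomposition: repeatedly measure the leading run of the remaining list and reduce over whole run lengths (runs of length 1 contribute nothing, matching A), instead of maintaining cur/prev/max per element.
import Mathlib
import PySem

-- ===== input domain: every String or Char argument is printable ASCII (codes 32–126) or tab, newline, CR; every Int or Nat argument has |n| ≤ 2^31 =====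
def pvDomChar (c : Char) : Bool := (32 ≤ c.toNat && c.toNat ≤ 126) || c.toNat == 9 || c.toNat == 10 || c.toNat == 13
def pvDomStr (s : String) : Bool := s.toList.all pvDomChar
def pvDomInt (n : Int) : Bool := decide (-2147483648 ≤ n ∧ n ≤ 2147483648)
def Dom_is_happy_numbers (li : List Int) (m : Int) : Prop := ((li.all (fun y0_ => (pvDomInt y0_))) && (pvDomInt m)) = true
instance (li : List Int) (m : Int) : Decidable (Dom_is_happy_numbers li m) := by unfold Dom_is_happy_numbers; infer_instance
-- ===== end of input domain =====

-- B replaces A's running-counter scan by a run-skipping decomposition (measure each leading run, reduce over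
-- whole run lengths); alternative structure, not claimed faster. Equivalence is about the return value.

-- ===== PORT A =====
-- literal port of A: prev = li[0]; for i in range(1, len(li)): running counter cur / max_value
def is_happy_numbers (li : List Int) (m : Int) : Bool :=
  match PySem.List.pyGet? li 0 with
  | none => false   -- unreachable under Pre_: Python raises IndexError here
  | some prev0 =>
    let st := (PySem.List.pyRange 1 (li.length : Int) 1).foldl
      (fun (st : Int × Int × Int) i =>
        let x := PySem.List.pyGetD li i 0
        if x = st.2.2 then (max st.1 (st.2.1 + 1), st.2.1 + 1, x)
        else (st.1, (1 : Int), x))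
      ((0 : Int), (1 : Int), prev0)
    decide (m ≤ st.1)

-- ===== PORT B =====
-- _lead_count(h, t): number of leading elements of t equal to h (Source B's inner while loop)
def leadCount (h : Int) : List Int → Nat
  | [] => 0
  | y :: t => if y = h then leadCount h t + 1 else 0

-- Source B's outer while loop over the remaining list `rest`, accumulator `best`
-- Source B's outer while loop; the fuel argument (initially len(li)) only makes the recursion structural,
-- it never cuts the computation short since each round consumes at least one element
def bestAux : Nat → List Int → Int → Int
  | 0, _, best => best
  | _ + 1, [], best => best
  | fuel + 1, x :: t, best =>
      let k := leadCount x t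
      let run : Int := 1 + (k : Int)
      let best' := if 2 ≤ run then max best run else best
      bestAux fuel (t.drop k) best'

def is_happy_numbers_alt (li : List Int) (m : Int) : Bool :=
  decide (m ≤ bestAux li.length li 0)

-- ===== PRECONDITION & SPEC =====
-- Pre_ excludes only the empty list, on which A raises IndexError (li[0]).
def Pre_is_happy_numbers (li : List Int) (m : Int) : Prop := li ≠ []
instance (li : List Int) (m : Int) : Decidable (Pre_is_happy_numbers li m) := by unfold Pre_is_happy_numbers; infer_instance
def pvWitness_is_happy_numbers : List Int × Int := ([1, 1, 2], 2)

def Spec_is_happy_numbers (li : List Int) (m : Int) (out : Bool) : Prop := out = is_happy_numbers_alt li m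
instance (li : List Int) (m : Int) (out : Bool) : Decidable (Spec_is_happy_numbers li m out) := by unfold Spec_is_happy_numbers; infer_instance

-- ===== CLAIM (what is proved, stated in full; the proofs are below) =====
def Claim_equal_is_happy_numbers : Prop := ∀ (li : List Int) (m : Int), Dom_is_happy_numbers li m → Pre_is_happy_numbers li m → Spec_is_happy_numbers li m (is_happy_numbers li m)

-- ===== LEMMAS AND PROOFS =====

-- A's loop body over elements (after foldl_pyRange_pyGetD removes the index plumbing)
def stepA (st : Int × Int × Int) (x : Int) : Int × Int × Int :=
  if x = st.2.2 then (max st.1 (st.2.1 + 1), st.2.1 + 1, x) else (st.1, (1 : Int), x)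

def loopA (t : List Int) (st : Int × Int × Int) : Int × Int × Int := t.foldl stepA st

-- A restarted at the head of each new run
def loopA2 : List Int → Int → Int
  | [], mx => mx
  | y :: t, mx => (loopA t (mx, 1, y)).1

lemma loopA_run (t : List Int) : ∀ (x mx cur : Int),
    (loopA t (mx, cur, x)).1 =
      loopA2 (t.drop (leadCount x t))
        (if leadCount x t = 0 then mx else max mx (cur + (leadCount x t : Int))) := by
  induction t with
  | nil => intro x mx cur; simp [loopA, loopA2, leadCount]
  | cons y t ih =>
    intro x mx cur
    by_cases hy : y = x
    · subst hy
      have : loopA (y :: t) (mx, cur, y) = loopA t (max mx (cur + 1), cur + 1, y) := by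
        simp [loopA, stepA]
      rw [this, ih]
      have hk : leadCount y (y :: t) = leadCount y t + 1 := by simp [leadCount]
      rw [hk]
      by_cases h0 : leadCount y t = 0
      · simp [h0]
      · simp only [h0, Nat.succ_ne_zero, if_false]
        have hle : cur + 1 ≤ cur + 1 + (leadCount y t : Int) := by omega
        have : max (max mx (cur + 1)) (cur + 1 + (leadCount y t : Int))
             = max mx (cur + (↑(leadCount y t + 1) : Int)) := by
          push_cast
          rw [max_assoc, max_eq_right hle]
          ring_nf
        simp only [List.drop_succ_cons]
        rw [this]
    · have hstep : loopA (y :: t) (mx, cur, x) = loopA t (mx, 1, y) := by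
        simp [loopA, stepA, hy]
      have hk : leadCount x (y :: t) = 0 := by simp [leadCount, hy]
      rw [hstep, hk]
      simp [loopA2]

lemma loopA2_eq_bestAux : ∀ (n : Nat) (rest : List Int), rest.length ≤ n →
    ∀ mx, loopA2 rest mx = bestAux n rest mx := by
  intro n
  induction n with
  | zero =>
    intro rest h mx
    have : rest = [] := List.length_eq_zero_iff.mp (Nat.le_zero.mp h)
    subst this; simp [loopA2, bestAux]
  | succ n ih =>
    intro rest h mx
    match rest with
    | [] => simp [loopA2, bestAux]
    | y :: t =>
      have hlen : t.length ≤ n := by simpa using h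
      rw [show loopA2 (y :: t) mx = (loopA t (mx, 1, y)).1 from rfl, loopA_run]
      rw [bestAux]
      set k := leadCount y t with hk
      have hdrop : (t.drop k).length ≤ n := by
        have h := hlen
        simp only [List.length_drop]
        omega
      by_cases h0 : k = 0
      · simp only [h0, List.drop_zero, Nat.cast_zero]
        norm_num
        exact ih t hlen mx
      · have h2 : (2 : Int) ≤ 1 + (k : Int) := by omega
        simp only [if_neg h0, if_pos h2]
        exact ih _ hdrop _

-- ===== VERDICT (by name: the statement is the Claim_ definition above) =====
theorem is_happy_numbers_spec : Claim_equal_is_happy_numbers := by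
  intro li m _ hpre
  unfold Spec_is_happy_numbers
  match li, hpre with
  | x :: t, _ =>
    unfold is_happy_numbers is_happy_numbers_alt
    have hget : PySem.List.pyGet? (x :: t) 0 = some x := by
      simp [PySem.List.pyGet?, PySem.List.pyIdx?]
    rw [hget]
    have hfold : (PySem.List.pyRange 1 ((x :: t).length : Int) 1).foldl
        (fun (st : Int × Int × Int) i =>
          let y := PySem.List.pyGetD (x :: t) i 0
          if y = st.2.2 then (max st.1 (st.2.1 + 1), st.2.1 + 1, y)
          else (st.1, (1 : Int), y))
        ((0 : Int), (1 : Int), x)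
        = ((x :: t).drop 1).foldl stepA ((0 : Int), (1 : Int), x) := by
      have := PySem.List.foldl_pyRange_pyGetD (xs := x :: t) (d := (0 : Int))
        (f := stepA) (init := ((0 : Int), (1 : Int), x)) (a := 1) (by norm_num)
      simpa [stepA] using this
    simp only [hfold]
    have : ((x :: t).drop 1).foldl stepA ((0 : Int), (1 : Int), x) = loopA t (0, 1, x) := rfl
    rw [this]
    have h2 : (loopA t (0, 1, x)).1 = loopA2 (x :: t) 0 := rfl
    rw [h2, loopA2_eq_bestAux (x :: t).length _ le_rfl]
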